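-- pv_equiv track=rewrite | github.com/babar-raza/content-generator | src/utils/content_utils.py | find_license_insertion_point
-- ===== SOURCE A (Python) =====
-- def find_license_insertion_point(code: str) -> int:
--     """Find best position to insert license header."""
--     lines = code.split('\n')
--
--     insert_line = 0
--     for i, line in enumerate(lines):
--         if line.strip():
--             insert_line = i
--             break
--
--     return sum(len(lines[i]) + 1 for i in range(insert_line))
-- ===== SOURCE B (Python) =====
-- def find_license_insertion_point(code: str) -> int:
--     """Find best position to insert license header."""
--     offset = 0
--     for line in code.split('\n'):
--         if line.strip():
--             return offset
--         offset += len(line) + 1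
--     return 0
-- ===== Notes on version B (the rewrite author's own statement) =====
-- stated objective: simpler
-- what changed: Replaces A's two-phase scheme (index-finding loop plus a second indexed prefix-sum over range(insert_line)) with one accumulating pass that returns the running offset at the first non-blank line.
import Mathlib
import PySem

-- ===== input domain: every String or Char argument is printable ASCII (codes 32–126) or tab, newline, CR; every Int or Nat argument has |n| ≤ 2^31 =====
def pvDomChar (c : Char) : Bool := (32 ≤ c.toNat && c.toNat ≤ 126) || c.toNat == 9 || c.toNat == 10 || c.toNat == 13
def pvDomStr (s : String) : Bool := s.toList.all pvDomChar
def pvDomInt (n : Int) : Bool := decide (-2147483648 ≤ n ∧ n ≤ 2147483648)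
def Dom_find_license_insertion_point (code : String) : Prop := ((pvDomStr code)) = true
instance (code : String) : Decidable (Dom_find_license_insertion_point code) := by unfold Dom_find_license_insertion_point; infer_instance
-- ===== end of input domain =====

-- B replaces A's two-phase scheme (find first non-blank index, then a separate indexed
-- prefix sum over range(insert_line)) with one accumulating pass; objective: simpler.


-- ===== PORT A =====
-- the 'for i, line in enumerate(lines): if line.strip(): insert_line = i; break' loop
def flipFindLoop : List String → Nat → Nat
  | [], _ => 0
  | l :: ls, i => if PySem.Str.strip l ≠ "" then i else flipFindLoop ls (i + 1)

def find_license_insertion_point (code : String) : Int :=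
  let lines := (PySem.Str.split? code "\n").getD []
  let insert_line := flipFindLoop lines 0
  (((PySem.List.pyRange 0 (insert_line : Int) 1).map
      (fun i => PySem.Str.len (PySem.List.pyGetD lines i "") + 1)).sum)

-- ===== PORT B =====
-- single accumulating pass: running offset, returned at the first non-blank line
def flipScan : List String → Int → Int
  | [], _ => 0
  | l :: ls, off => if PySem.Str.strip l ≠ "" then off else flipScan ls (off + PySem.Str.len l + 1)

def find_license_insertion_point_alt (code : String) : Int :=
  flipScan ((PySem.Str.split? code "\n").getD []) 0

-- ===== PRECONDITION & SPEC =====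
def Spec_find_license_insertion_point (code : String) (out : Int) : Prop := out = find_license_insertion_point_alt code
instance (code : String) (out : Int) : Decidable (Spec_find_license_insertion_point code out) := by unfold Spec_find_license_insertion_point; infer_instance

-- ===== CLAIM (what is proved, stated in full; the proofs are below) =====
def Claim_equal_find_license_insertion_point : Prop := ∀ (code : String), Dom_find_license_insertion_point code → Spec_find_license_insertion_point code (find_license_insertion_point code)

-- ===== LEMMAS AND PROOFS =====

def flipFound (ls : List String) : Bool := ls.any (fun l => PySem.Str.strip l ≠ "")

theorem flipFindLoop_not_found (ls : List String) (h : flipFound ls = false) :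
    ∀ i, flipFindLoop ls i = 0 := by
  induction ls with
  | nil => intro i; rfl
  | cons l ls ih =>
    intro i
    simp [flipFound, List.any_cons] at h
    have hf : flipFound ls = false := by simp [flipFound]; exact h.2
    simp [flipFindLoop, h.1, ih hf]

theorem flipScan_not_found (ls : List String) (h : flipFound ls = false) :
    ∀ off, flipScan ls off = 0 := by
  induction ls with
  | nil => intro off; rfl
  | cons l ls ih =>
    intro off
    simp [flipFound, List.any_cons] at h
    have hf : flipFound ls = false := by simp [flipFound]; exact h.2
    simp [flipScan, h.1, ih hf]

theorem flipFindLoop_shift (ls : List String) (h : flipFound ls = true) :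
    ∀ i, flipFindLoop ls i = i + flipFindLoop ls 0 := by
  induction ls with
  | nil => simp [flipFound] at h
  | cons l ls ih =>
    intro i
    by_cases hl : PySem.Str.strip l ≠ ""
    · simp [flipFindLoop, hl]
    · have hf : flipFound ls = true := by
        simp [flipFound, List.any_cons] at h ⊢
        rcases h with h | h
        · exact absurd h (by simpa using hl)
        · exact h
      simp only [flipFindLoop, if_neg hl]
      rw [ih hf (i + 1), ih hf 1]
      omega

theorem flipScan_shift (ls : List String) (h : flipFound ls = true) :
    ∀ off, flipScan ls off = off + flipScan ls 0 := by
  induction ls with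
  | nil => simp [flipFound] at h
  | cons l ls ih =>
    intro off
    by_cases hl : PySem.Str.strip l ≠ ""
    · simp [flipScan, hl]
    · have hf : flipFound ls = true := by
        simp [flipFound, List.any_cons] at h ⊢
        rcases h with h | h
        · exact absurd h (by simpa using hl)
        · exact h
      simp only [flipScan, if_neg hl]
      rw [ih hf (off + PySem.Str.len l + 1), ih hf (0 + PySem.Str.len l + 1)]
      omega

-- A's prefix sum, rewritten over List.range with Nat indexing
theorem flipSum_eq (xs : List String) (k : Nat) :
    ((PySem.List.pyRange 0 (k : Int) 1).map
        (fun i => PySem.Str.len (PySem.List.pyGetD xs i "") + 1)).sum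
      = ((List.range k).map (fun j => PySem.Str.len (xs.getD j "") + 1)).sum := by
  rw [PySem.List.pyRange_one]
  simp only [List.map_map]
  rw [show ((k : Int) - 0).toNat = k by simp]
  congr 1
  refine List.map_congr_left ?_
  intro j hj
  simp

theorem flipSum_cons (l : String) (xs : List String) (k : Nat) :
    ((List.range (k + 1)).map (fun j => PySem.Str.len ((l :: xs).getD j "") + 1)).sum
      = PySem.Str.len l + 1 + ((List.range k).map (fun j => PySem.Str.len (xs.getD j "") + 1)).sum := by
  rw [List.range_succ_eq_map, List.map_cons, List.map_map, List.sum_cons]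
  have hfun : ((fun j => PySem.Str.len ((l :: xs).getD j "") + 1) ∘ Nat.succ)
      = (fun j => PySem.Str.len (xs.getD j "") + 1) := by
    funext j; simp [List.getD]
  rw [hfun]
  simp [List.getD]

theorem flip_key (ls : List String) :
    ((List.range (flipFindLoop ls 0)).map (fun j => PySem.Str.len (ls.getD j "") + 1)).sum
      = flipScan ls 0 := by
  induction ls with
  | nil => simp [flipFindLoop, flipScan]
  | cons l ls ih =>
    by_cases hl : PySem.Str.strip l ≠ ""
    · simp [flipFindLoop, flipScan, hl]
    · simp only [flipFindLoop, flipScan, if_neg hl]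
      by_cases hf : flipFound ls = true
      · rw [flipFindLoop_shift ls hf 1, flipScan_shift ls hf (0 + PySem.Str.len l + 1)]
        rw [show 1 + flipFindLoop ls 0 = flipFindLoop ls 0 + 1 by omega]
        rw [flipSum_cons]
        rw [ih]
        omega
      · have hf' : flipFound ls = false := by simpa using hf
        rw [flipFindLoop_not_found ls hf' 1, flipScan_not_found ls hf' (0 + PySem.Str.len l + 1)]
        simp

-- ===== VERDICT (by name: the statement is the Claim_ definition above) =====
theorem find_license_insertion_point_spec : Claim_equal_find_license_insertion_point := by
  intro code _
  unfold Spec_find_license_insertion_point find_license_insertion_point find_license_insertion_point_alt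
  rw [flipSum_eq]
  exact flip_key ((PySem.Str.split? code "\n").getD [])
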